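-- pv_equiv track=rewrite | github.com/jjacobson95/lipid_gui_copy_w_permissions | lipidimea/_lipidlib/parser.py | _combined_oxy_suffix_from_oxy_suffix_chains
-- ===== SOURCE A (Python) =====
-- from typing import List, Optional, Tuple, Union, Dict, Any
--
-- def _suffixes_combinable(suffixes: List[str]) -> Tuple[bool, Optional[str]]:
--     """
--     determine if the list of suffixes is combinable
--
--     Parameters
--     ----------
--     suffixes : ``list(str)``
--         list of suffixes
--
--     Returns
--     -------
--     combinable : ``bool``
--         flag indicating if suffixes are combinable
--     mod_type : ``str`` or ``None``
--         type of oxidized modifications to combine, "O" or None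
--     """
--     # check for O variants
--     all_o_variants = True  # flag indicating that all suffixes are O variants
--     for suffix in suffixes:
--         if len(suffix) < 3:
--             if suffix[0] == "O":
--                 if len(suffix) > 1 and not suffix[1].isdigit():
--                     all_o_variants = False
--             else:
--                 all_o_variants = False
--         else:
--             all_o_variants = False
--     if all_o_variants:
--         return True, "O"
--     #TODO: check for other modifications like Ep or OOH
--     # assume False for any cases not explicitly covered
--     return False, None
--
-- def _combine_o_variants(suffixes: List[str]) -> str:
--     """
--     combine variants of O (O, O1, O2 ...)
--
--     Parameters
--     ----------
--     suffixes : ``list(str)``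
--         list of suffixes
--
--     Returns
--     -------
--     combined : ``str``
--         combined oxy suffix
--     """
--     cnt = 0
--     for suffix in suffixes:
--         if len(suffix) > 1:
--             cnt += int(suffix[1])
--         else:
--             cnt += 1
--     return "O{}".format(cnt)
--
-- def _combined_oxy_suffix_from_oxy_suffix_chains(oxy_suffix_chains: List[str]) -> Optional[str]:
--     """
--     come up with a single oxy suffix value from possibly multiple values from different chains
--     so that the LMAPS ID prefix can be looked up.
--
--     TODO: Need to come up with whatever appropriate sematics for combining multiple oxy suffixes.
--             For instance ['O', 'O', ''] should resolve to 'O2', but what should happen with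
--             something like ['O', 'Ep', 'OOH']? No clue. For now I will implement combining "like"
--             suffixes (i.e., the first case above) and revisit the latter case at some later point
--
--     Parameters
--     ----------
--     oxy_suffix_chains : ``list(str)``
--         list of oxidation suffixes for each FA chain
--
--     Returns
--     -------
--     combined_oxy_suffix : ``str`` or ``None``
--         single combined oxidation suffix for the lipid, None if cannot be combined
--     """
--     # set what functions to use for combining different mod_types
--     comb_funcs = {
--         "O": _combine_o_variants,
--     }
--     # convert oxy_suffix_chains to only non-empty oxy suffixes
--     non_empty = [_ for _ in oxy_suffix_chains if _ != ""]
--     if len(non_empty) == 0: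
--         return ""
--     elif len(non_empty) == 1:
--         return non_empty[0]
--     else:
--         combinable, mod_type = _suffixes_combinable(non_empty)
--         if combinable:
--             # combine "like" suffixes
--             # use the appropriate combining function based on mod_type
--             return comb_funcs[mod_type](non_empty)
--         else:
--             # else ... IDK what to do from here
--             return None
-- ===== SOURCE B (Python) =====
-- def _combined_oxy_suffix_from_oxy_suffix_chains(oxy_suffix_chains):
--     non_empty = [s for s in oxy_suffix_chains if s != ""]
--     if not non_empty:
--         return ""
--     if len(non_empty) == 1:
--         return non_empty[0]
--     # single pass: validate each suffix as an O-variant and accumulate the count,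
--     # bailing out with None on the first suffix that is not an O-variant
--     cnt = 0
--     for s in non_empty:
--         if len(s) >= 3 or s[0] != "O" or (len(s) > 1 and not s[1].isdigit()):
--             return None
--         cnt += int(s[1]) if len(s) > 1 else 1
--     return "O" + str(cnt)
-- ===== Notes on version B (the rewrite author's own statement) =====
-- stated objective: simpler
-- what changed: Replaces the two helper functions (a flag-accumulating validation pass plus a separate summing pass dispatched through a function dict) with one fused loop over the non-empty suffixes that validates and accumulates together, returning None at the first non-O-variant.
import Mathlib
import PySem

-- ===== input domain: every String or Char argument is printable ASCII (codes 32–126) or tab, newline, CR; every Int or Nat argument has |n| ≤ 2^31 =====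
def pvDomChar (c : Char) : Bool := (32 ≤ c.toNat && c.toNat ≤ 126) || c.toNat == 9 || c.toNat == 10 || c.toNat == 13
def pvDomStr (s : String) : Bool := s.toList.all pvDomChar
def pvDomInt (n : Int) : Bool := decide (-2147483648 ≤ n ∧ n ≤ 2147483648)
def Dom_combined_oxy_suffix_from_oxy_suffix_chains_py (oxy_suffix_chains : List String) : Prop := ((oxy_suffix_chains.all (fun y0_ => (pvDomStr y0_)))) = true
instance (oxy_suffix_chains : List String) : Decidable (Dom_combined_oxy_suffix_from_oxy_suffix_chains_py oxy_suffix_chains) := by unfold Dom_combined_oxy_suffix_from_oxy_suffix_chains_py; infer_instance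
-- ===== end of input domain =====

-- B fuses A's validate-pass + combine-pass (dispatched through a function dict) into one
-- loop that validates each suffix and accumulates the O count, returning none on first failure.


-- ===== PORT A =====
-- _suffixes_combinable: the flag-updating loop body, then the (flag, mod_type) result.
-- suffix[0] / suffix[1] are guarded by the surrounding length tests in the Python, so the
-- pyGetD defaults are never consulted on inputs the Python reaches without raising.
def pyA_validStep (flag : Bool) (s : String) : Bool :=
  let cs := s.toList
  if cs.length < 3 then
    if PySem.List.pyGetD cs 0 ' ' = 'O' then
      if 1 < cs.length && !PySem.Chars.isdigit (PySem.List.pyGetD cs 1 ' ') then false else flag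
    else false
  else false

def pyA_suffixes_combinable (suffixes : List String) : Bool × Option String :=
  let all_o := suffixes.foldl pyA_validStep true
  if all_o then (true, some "O") else (false, none)

-- _combine_o_variants; int(suffix[1]) is guarded (the digit was validated), so .getD 0 is never consulted.
def pyA_combine_o_variants (suffixes : List String) : String :=
  let cnt : Int := suffixes.foldl (fun cnt s =>
    let cs := s.toList
    if 1 < cs.length then cnt + (PySem.Int.ofChars? [PySem.List.pyGetD cs 1 ' ']).getD 0
    else cnt + 1) 0
  String.ofList ('O' :: PySem.Int.toChars cnt)   -- "O{}".format(cnt)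

def combined_oxy_suffix_from_oxy_suffix_chains_py (oxy_suffix_chains : List String) : Option String :=
  -- comb_funcs = {"O": _combine_o_variants}  (a one-key dict literal)
  let comb_funcs : PySem.Dict String (List String → String) :=
    PySem.Dict.empty.insert "O" pyA_combine_o_variants
  let non_empty := oxy_suffix_chains.filter (fun s => s ≠ "")
  if non_empty.length = 0 then some ""
  else if non_empty.length = 1 then some (PySem.List.pyGetD non_empty 0 "")
  else
    let r := pyA_suffixes_combinable non_empty
    if r.1 then
      -- comb_funcs[mod_type](non_empty); the key is present whenever combinable holds
      (comb_funcs.get? (r.2.getD "")).map (fun f => f non_empty)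
    else none

-- ===== PORT B =====
-- the fused validate-and-count loop of Source B
def altGo : List String → Int → Option String
  | [], cnt => some (String.ofList ('O' :: PySem.Int.toChars cnt))   -- "O" + str(cnt)
  | s :: rest, cnt =>
    let cs := s.toList
    if 3 ≤ cs.length || !(PySem.List.pyGetD cs 0 ' ' = 'O') ||
        (1 < cs.length && !PySem.Chars.isdigit (PySem.List.pyGetD cs 1 ' ')) then none
    else altGo rest (cnt + (if 1 < cs.length then (PySem.Int.ofChars? [PySem.List.pyGetD cs 1 ' ']).getD 0 else 1))

def combined_oxy_suffix_from_oxy_suffix_chains_py_alt (oxy_suffix_chains : List String) : Option String :=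
  let non_empty := oxy_suffix_chains.filter (fun s => s ≠ "")
  if non_empty.length = 0 then some ""
  else if non_empty.length = 1 then some (PySem.List.pyGetD non_empty 0 "")
  else altGo non_empty 0

-- ===== PRECONDITION & SPEC =====
def Spec_combined_oxy_suffix_from_oxy_suffix_chains_py (oxy_suffix_chains : List String) (out : Option String) : Prop := out = combined_oxy_suffix_from_oxy_suffix_chains_py_alt oxy_suffix_chains
instance (oxy_suffix_chains : List String) (out : Option String) : Decidable (Spec_combined_oxy_suffix_from_oxy_suffix_chains_py oxy_suffix_chains out) := by unfold Spec_combined_oxy_suffix_from_oxy_suffix_chains_py; infer_instance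

-- ===== CLAIM (what is proved, stated in full; the proofs are below) =====
def Claim_equal_combined_oxy_suffix_from_oxy_suffix_chains_py : Prop := ∀ (oxy_suffix_chains : List String), Dom_combined_oxy_suffix_from_oxy_suffix_chains_py oxy_suffix_chains → Spec_combined_oxy_suffix_from_oxy_suffix_chains_py oxy_suffix_chains (combined_oxy_suffix_from_oxy_suffix_chains_py oxy_suffix_chains)

-- ===== LEMMAS AND PROOFS =====

-- A's flag update equals "false on B's bail-out condition, else unchanged"
theorem validStep_eq (flag : Bool) (s : String) :
    pyA_validStep flag s =
      if (3 ≤ s.toList.length || !(PySem.List.pyGetD s.toList 0 ' ' = 'O') ||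
          (1 < s.toList.length && !PySem.Chars.isdigit (PySem.List.pyGetD s.toList 1 ' '))) = true
      then false else flag := by
  simp only [pyA_validStep]
  by_cases h2 : PySem.List.pyGetD s.toList 0 ' ' = 'O' <;>
    simp [h2, ← decide_not, Bool.and_assoc]

-- once the flag is false it stays false
theorem foldl_validStep_false (l : List String) : l.foldl pyA_validStep false = false := by
  induction l with
  | nil => rfl
  | cons s rest ih =>
    simp only [List.foldl_cons, validStep_eq]
    split_ifs <;> simp [ih]

-- B's loop computes exactly: if A's validation flag survives, A's combined sum, else none
theorem altGo_eq (l : List String) (cnt : Int) :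
    altGo l cnt =
      if l.foldl pyA_validStep true then
        some (String.ofList ('O' :: PySem.Int.toChars (l.foldl (fun c s =>
          let cs := s.toList
          if 1 < cs.length then c + (PySem.Int.ofChars? [PySem.List.pyGetD cs 1 ' ']).getD 0
          else c + 1) cnt)))
      else none := by
  induction l generalizing cnt with
  | nil => rfl
  | cons s rest ih =>
    have hv := validStep_eq true s
    simp only [List.foldl_cons]
    by_cases hbad : (3 ≤ s.toList.length || !(PySem.List.pyGetD s.toList 0 ' ' = 'O') ||
        (1 < s.toList.length && !PySem.Chars.isdigit (PySem.List.pyGetD s.toList 1 ' '))) = true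
    · rw [if_pos hbad] at hv
      rw [hv, foldl_validStep_false]
      unfold altGo
      simp only [hbad, if_true, Bool.false_eq_true, ite_false]
    · rw [if_neg hbad] at hv
      rw [hv]
      unfold altGo
      simp only [hbad, Bool.false_eq_true, if_false]
      have hadd : cnt + (if 1 < s.toList.length then
            (PySem.Int.ofChars? [PySem.List.pyGetD s.toList 1 ' ']).getD 0 else 1)
          = (if 1 < s.toList.length then
            cnt + (PySem.Int.ofChars? [PySem.List.pyGetD s.toList 1 ' ']).getD 0 else cnt + 1) := by
        split_ifs <;> ring
      rw [hadd]
      exact ih _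

-- ===== VERDICT (by name: the statement is the Claim_ definition above) =====
theorem combined_oxy_suffix_from_oxy_suffix_chains_py_spec : Claim_equal_combined_oxy_suffix_from_oxy_suffix_chains_py := by
  intro l _
  unfold Spec_combined_oxy_suffix_from_oxy_suffix_chains_py
  unfold combined_oxy_suffix_from_oxy_suffix_chains_py combined_oxy_suffix_from_oxy_suffix_chains_py_alt
  set ne := l.filter (fun s => s ≠ "") with hne
  by_cases h0 : ne.length = 0
  · simp [h0]
  · by_cases h1 : ne.length = 1
    · simp [h1]
    · simp only [h0, h1, if_false]
      rw [altGo_eq]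
      unfold pyA_suffixes_combinable
      by_cases hall : ne.foldl pyA_validStep true = true
      · simp [hall, pyA_combine_o_variants, PySem.Dict.get?_insert_self]
      · simp only [Bool.not_eq_true] at hall
        simp [hall]
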